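-- pv_equiv track=rewrite | github.com/maxcollard/ns248-winter23 | ps-1/ps1prob3.py | parse_posterior_columns
-- ===== SOURCE A (Python) =====
-- def parse_posterior_columns( pmf_data ):
--     """Use the `DataFrame` formatting from `bayes` to determine which column is which"""
--
--     group_columns = list( sorted( [ k
--                                     for k in pmf_data.keys()
--                                     if 'posterior::' in k ] ) )
--
--     non_group_columns = [ k
--                           for k in pmf_data.keys()
--                           if k not in group_columns ]
--
--     left_columns = [ k for k in non_group_columns if 'low::' in k ]
--     if len( left_columns ) > 1:
--         raise ValueError( 'Unsure which column is the left value column' )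
--     if len( left_columns ) == 0:
--         raise ValueError( 'No left value columns' )
--     left_column = left_columns[0]
--
--     right_columns = [ k for k in non_group_columns if 'high::' in k ]
--     if len( right_columns ) > 1:
--         raise ValueError( 'Unsure which column is the right value column' )
--     if len( right_columns ) == 0:
--         raise ValueError( 'No right value columns' )
--     right_column = right_columns[0]
--
--     other_columns = [ k
--                       for k in pmf_data.keys()
--                       if k not in group_columns + [left_column, right_column] ]
--
--     return group_columns, left_column, right_column, other_columns
-- ===== SOURCE B (Python) =====
-- def parse_posterior_columns(pmf_data):
--     """Single pass over the keys classifying each into group/left/right/other buckets."""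
--     group_columns = []
--     left_columns = []
--     right_columns = []
--     other_columns = []
--     for k in pmf_data.keys():
--         if 'posterior::' in k:
--             group_columns.append(k)
--         else:
--             hit = False
--             if 'low::' in k:
--                 left_columns.append(k)
--                 hit = True
--             if 'high::' in k:
--                 right_columns.append(k)
--                 hit = True
--             if not hit:
--                 other_columns.append(k)
--     group_columns.sort()
--     if len(left_columns) > 1:
--         raise ValueError('Unsure which column is the left value column')
--     if len(left_columns) == 0:
--         raise ValueError('No left value columns')
--     if len(right_columns) > 1:
--         raise ValueError('Unsure which column is the right value column')
--     if len(right_columns) == 0: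
--         raise ValueError('No right value columns')
--     return group_columns, left_columns[0], right_columns[0], other_columns
-- ===== Notes on version B (the rewrite author's own statement) =====
-- stated objective: simpler
-- what changed: Replaces A's five separate comprehension/filter passes over the keys (plus list-membership tests against the group list) by one loop that classifies each key into group/left/right/other buckets, sorting the group bucket afterwards.
import Mathlib
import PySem

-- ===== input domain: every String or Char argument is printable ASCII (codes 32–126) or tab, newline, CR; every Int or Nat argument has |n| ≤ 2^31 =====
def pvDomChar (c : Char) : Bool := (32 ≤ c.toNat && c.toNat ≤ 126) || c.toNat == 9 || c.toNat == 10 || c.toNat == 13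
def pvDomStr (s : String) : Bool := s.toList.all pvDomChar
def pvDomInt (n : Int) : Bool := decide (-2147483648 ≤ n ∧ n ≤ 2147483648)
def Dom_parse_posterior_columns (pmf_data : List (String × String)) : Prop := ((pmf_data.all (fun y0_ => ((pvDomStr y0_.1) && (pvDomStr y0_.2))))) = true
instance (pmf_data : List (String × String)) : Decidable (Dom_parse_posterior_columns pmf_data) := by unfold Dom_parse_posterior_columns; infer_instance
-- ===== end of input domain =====

-- B replaces A's five separate comprehension/filter passes over the keys by one
-- classifying loop into four buckets (objective: simpler, one pass; same asymptotics).

-- ===== PORT A =====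
-- A raises ValueError when the low/high bucket has length ≠ 1; those inputs are outside
-- Pre_ and the port returns junk ([],"","",[]) there.
def parse_posterior_columns (pmf_data : List (String × String)) : List String × String × String × List String :=
  let keys := (PySem.Dict.ofList pmf_data).keys
  let group_columns := PySem.List.sorted (keys.filter (fun k => PySem.Str.isIn "posterior::" k)) (fun x => x) false
  let non_group_columns := keys.filter (fun k => !(group_columns.contains k))
  let left_columns := non_group_columns.filter (fun k => PySem.Str.isIn "low::" k)
  if left_columns.length ≠ 1 then ([], "", "", []) else  -- ValueError (len > 1 or len = 0)
  let left_column := left_columns.headD ""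
  let right_columns := non_group_columns.filter (fun k => PySem.Str.isIn "high::" k)
  if right_columns.length ≠ 1 then ([], "", "", []) else  -- ValueError (len > 1 or len = 0)
  let right_column := right_columns.headD ""
  let other_columns := keys.filter (fun k => !((group_columns ++ [left_column, right_column]).contains k))
  (group_columns, left_column, right_column, other_columns)

-- ===== PORT B =====
def pvClassify (acc : List String × List String × List String × List String) (k : String) :
    List String × List String × List String × List String :=
  let (g, l, r, o) := acc
  if PySem.Str.isIn "posterior::" k then (g ++ [k], l, r, o)
  else
    let l' := if PySem.Str.isIn "low::" k then l ++ [k] else l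
    let r' := if PySem.Str.isIn "high::" k then r ++ [k] else r
    if PySem.Str.isIn "low::" k || PySem.Str.isIn "high::" k then (g, l', r', o)
    else (g, l', r', o ++ [k])

def parse_posterior_columns_alt (pmf_data : List (String × String)) : List String × String × String × List String :=
  let keys := (PySem.Dict.ofList pmf_data).keys
  let (g, l, r, o) := keys.foldl pvClassify ([], [], [], [])
  let g := PySem.List.sorted g (fun x => x) false
  if l.length ≠ 1 then ([], "", "", []) else  -- ValueError
  if r.length ≠ 1 then ([], "", "", []) else  -- ValueError
  (g, l.headD "", r.headD "", o)

-- ===== PRECONDITION & SPEC =====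
-- Pre_ excludes exactly the inputs on which A raises ValueError: the number of
-- non-'posterior::' keys containing 'low::' (resp. 'high::') must be exactly 1.
def Pre_parse_posterior_columns (pmf_data : List (String × String)) : Prop :=
  (((PySem.Dict.ofList pmf_data).keys.filter
      (fun k => !(PySem.Str.isIn "posterior::" k) && PySem.Str.isIn "low::" k)).length = 1) ∧
  (((PySem.Dict.ofList pmf_data).keys.filter
      (fun k => !(PySem.Str.isIn "posterior::" k) && PySem.Str.isIn "high::" k)).length = 1)
instance (pmf_data : List (String × String)) : Decidable (Pre_parse_posterior_columns pmf_data) := by unfold Pre_parse_posterior_columns; infer_instance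

def pvWitness_parse_posterior_columns : (List (String × String)) :=
  [("posterior::a", ""), ("low::x", ""), ("high::y", ""), ("z", "")]

def Spec_parse_posterior_columns (pmf_data : List (String × String)) (out : List String × String × String × List String) : Prop := out = parse_posterior_columns_alt pmf_data
instance (pmf_data : List (String × String)) (out : List String × String × String × List String) : Decidable (Spec_parse_posterior_columns pmf_data out) := by unfold Spec_parse_posterior_columns; infer_instance

-- ===== CLAIM (what is proved, stated in full; the proofs are below) =====
def Claim_equal_parse_posterior_columns : Prop := ∀ (pmf_data : List (String × String)), Dom_parse_posterior_columns pmf_data → Pre_parse_posterior_columns pmf_data → Spec_parse_posterior_columns pmf_data (parse_posterior_columns pmf_data)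

-- ===== LEMMAS AND PROOFS =====

theorem pvClassify_foldl (keys : List String) (g l r o : List String) :
    keys.foldl pvClassify (g, l, r, o) =
      (g ++ keys.filter (fun k => PySem.Str.isIn "posterior::" k),
       l ++ keys.filter (fun k => !(PySem.Str.isIn "posterior::" k) && PySem.Str.isIn "low::" k),
       r ++ keys.filter (fun k => !(PySem.Str.isIn "posterior::" k) && PySem.Str.isIn "high::" k),
       o ++ keys.filter (fun k => !(PySem.Str.isIn "posterior::" k) && !(PySem.Str.isIn "low::" k) && !(PySem.Str.isIn "high::" k))) := by
  induction keys generalizing g l r o with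
  | nil => simp
  | cons k ks ih =>
    simp only [List.foldl_cons, List.filter_cons, pvClassify]
    by_cases hp : PySem.Chars.isIn ['p','o','s','t','e','r','i','o','r',':',':'] k.toList = true <;>
      by_cases hl : PySem.Chars.isIn ['l','o','w',':',':'] k.toList = true <;>
      by_cases hh : PySem.Chars.isIn ['h','i','g','h',':',':'] k.toList = true <;>
      simp [hp, hl, hh, ih]

theorem pv_nongroup (keys : List String) :
    keys.filter (fun k => !((PySem.List.sorted (keys.filter (fun k => PySem.Str.isIn "posterior::" k)) (fun x => x) false).contains k)) =
    keys.filter (fun k => !(PySem.Str.isIn "posterior::" k)) := by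
  apply List.filter_congr
  intro k hk
  simp only [Bool.not_eq_eq_eq_not]
  simp [PySem.List.mem_sorted, List.mem_filter, hk]

theorem parse_posterior_columns_spec : Claim_equal_parse_posterior_columns := by
  intro pmf_data _ hpre
  obtain ⟨hl1, hr1⟩ := hpre
  show parse_posterior_columns pmf_data = parse_posterior_columns_alt pmf_data
  simp only [parse_posterior_columns, parse_posterior_columns_alt, pvClassify_foldl,
    List.nil_append]
  set keys := (PySem.Dict.ofList pmf_data).keys with hkeys
  rw [pv_nongroup]
  have hswap : ∀ (q : String → Bool),
      List.filter q (List.filter (fun k => !PySem.Str.isIn "posterior::" k) keys)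
      = List.filter (fun k => !PySem.Str.isIn "posterior::" k && q k) keys := by
    intro q
    rw [List.filter_filter]
    exact List.filter_congr (fun k _ => Bool.and_comm _ _)
  rw [hswap, hswap]
  obtain ⟨lc, hlc⟩ := List.length_eq_one_iff.mp hl1
  obtain ⟨rc, hrc⟩ := List.length_eq_one_iff.mp hr1
  rw [hlc, hrc]
  norm_num
  -- only the `other_columns` component remains
  have hlmem := List.mem_filter.mp (hlc ▸ List.mem_singleton_self lc)
  have hrmem := List.mem_filter.mp (hrc ▸ List.mem_singleton_self rc)
  obtain ⟨-, hlb⟩ := hlmem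
  obtain ⟨-, hrb⟩ := hrmem
  simp only [Bool.and_eq_true, Bool.not_eq_true'] at hlb hrb
  apply List.filter_congr
  intro k hk
  rw [Bool.eq_iff_iff]
  simp [hk]
  simp at hlb hrb
  constructor
  · rintro ⟨hp, hne_l, hne_r⟩
    refine ⟨⟨hp, ?_⟩, ?_⟩
    · by_contra hlow
      rw [Bool.not_eq_false] at hlow
      apply hne_l
      have hkmem : k ∈ List.filter
          (fun k => !PySem.Str.isIn "posterior::" k && PySem.Str.isIn "low::" k) keys :=
        List.mem_filter.mpr ⟨hk, by simp [hp, hlow]⟩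
      rw [hlc] at hkmem
      simpa using hkmem
    · by_contra hhigh
      rw [Bool.not_eq_false] at hhigh
      apply hne_r
      have hkmem : k ∈ List.filter
          (fun k => !PySem.Str.isIn "posterior::" k && PySem.Str.isIn "high::" k) keys :=
        List.mem_filter.mpr ⟨hk, by simp [hp, hhigh]⟩
      rw [hrc] at hkmem
      simpa using hkmem
  · rintro ⟨⟨hp, hnl⟩, hnh⟩
    refine ⟨hp, ?_, ?_⟩
    · intro h; subst h; simp [hlb.2] at hnl
    · intro h; subst h; simp [hrb.2] at hnh
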